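-- pv_equiv track=rewrite | github.com/cedricusureau/HLA_graph | src/eplet_extraction.py | reorder_dict_by_eplet_frequency
-- ===== SOURCE A (Python) =====
-- def reorder_dict_by_eplet_frequency(eplet_dict):
--     frequency_count = {}
--
--     for beads, eplets in eplet_dict.items():
--         for eplet in eplets:
--             if eplet not in frequency_count.keys():
--                 frequency_count[eplet] = 1
--             else :
--                 frequency_count[eplet] += 1
--
--     frequency_count = {k: v for k, v in sorted(frequency_count.items(), key=lambda item: item[1], reverse=True)}
--
--     new_eplet_dict = {}
--
--     for beads, eplets in eplet_dict.items():
--         new_eplets_list = []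
--         for i,j in frequency_count.items():
--             if i in eplets:
--                 new_eplets_list.append(i)
--
--         new_eplet_dict[beads] = new_eplets_list
--
--     return new_eplet_dict
-- ===== SOURCE B (Python) =====
-- def reorder_dict_by_eplet_frequency(eplet_dict):
--     freq = {}
--     for es in eplet_dict.values():
--         for e in es:
--             freq[e] = freq.get(e, 0) + 1
--
--     # global first-appearance rank: reproduces the stable sort's tie-breaking
--     rank = {e: i for i, e in enumerate(freq)}
--
--     # sort each bead's deduped eplets directly by (frequency desc, first appearance)
--     return {b: sorted(dict.fromkeys(es), key=lambda e: (-freq[e], rank[e]))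
--             for b, es in eplet_dict.items()}
-- ===== Notes on version B (the rewrite author's own statement) =====
-- stated objective: faster
-- what changed: A builds one global list of all eplets sorted by frequency descending and then rebuilds every bead's list by scanning that whole global order and membership-testing each eplet against the bead's list; B never builds or filters a global order: it sorts each bead's deduped eplet list directly with the composite key (-frequency, global first-appearance rank), which reproduces the stable sort's tie-breaking and removes the beads-times-eplets filter scan.
import Mathlib
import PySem

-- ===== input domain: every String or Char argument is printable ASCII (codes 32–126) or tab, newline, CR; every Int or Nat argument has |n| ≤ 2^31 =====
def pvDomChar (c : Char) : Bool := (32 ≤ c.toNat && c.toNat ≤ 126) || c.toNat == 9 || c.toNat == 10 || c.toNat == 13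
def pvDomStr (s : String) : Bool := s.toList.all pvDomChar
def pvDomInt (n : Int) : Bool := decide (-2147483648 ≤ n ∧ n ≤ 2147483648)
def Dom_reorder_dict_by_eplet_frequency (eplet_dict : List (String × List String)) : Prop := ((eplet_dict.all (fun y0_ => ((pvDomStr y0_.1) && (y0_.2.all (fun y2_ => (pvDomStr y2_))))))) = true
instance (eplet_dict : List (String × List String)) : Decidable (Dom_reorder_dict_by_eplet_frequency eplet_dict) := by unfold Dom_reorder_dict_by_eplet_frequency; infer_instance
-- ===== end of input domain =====

-- B drops A's global frequency-sorted order and per-bead membership filter entirely: it sorts each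
-- bead's deduped eplet list directly by the composite key (frequency descending, global
-- first-appearance rank); objective: faster (no per-bead scan of the whole global eplet order).

-- ===== PORT A =====
def reorder_dict_by_eplet_frequency (eplet_dict : List (String × List String)) : List (String × List String) :=
  let frequency_count : PySem.Dict String Int :=
    eplet_dict.foldl (fun fc p =>
      p.2.foldl (fun fc eplet =>
        if fc.contains eplet = false then fc.insert eplet 1
        else fc.modify eplet 0 (· + 1)) fc) PySem.Dict.empty
  let frequency_count2 : PySem.Dict String Int :=
    PySem.Dict.ofList (PySem.List.sorted frequency_count.items (fun item => item.2) true)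
  let new_eplet_dict : PySem.Dict String (List String) :=
    eplet_dict.foldl (fun nd p =>
      nd.insert p.1 (frequency_count2.items.foldl
        (fun acc ij => if p.2.contains ij.1 then acc ++ [ij.1] else acc) [])) PySem.Dict.empty
  new_eplet_dict.items

-- ===== PORT B =====
def reorder_dict_by_eplet_frequency_alt (eplet_dict : List (String × List String)) : List (String × List String) :=
  let freq : PySem.Dict String Int :=
    eplet_dict.foldl (fun d p =>
      p.2.foldl (fun d e => d.insert e (d.getD e 0 + 1)) d) PySem.Dict.empty
  let rank : PySem.Dict String Int :=
    PySem.Dict.ofList ((PySem.List.enumerate freq.keys).map (fun p => (p.2, p.1)))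
  (eplet_dict.foldl (fun nd p =>
    nd.insert p.1 (PySem.List.sorted2 (PySem.List.dedup p.2)
      (fun e => -(freq.getD e 0)) (fun e => rank.getD e 0) false)) PySem.Dict.empty).items

-- ===== PRECONDITION & SPEC =====
-- Pre_ excludes association lists with duplicate bead keys: a Python dict cannot carry
-- duplicate keys, so such lists correspond to no real input and the two ports may read
-- them differently; every actual dict satisfies Pre_.
def Pre_reorder_dict_by_eplet_frequency (eplet_dict : List (String × List String)) : Prop :=
  (eplet_dict.map Prod.fst).Nodup
instance (eplet_dict : List (String × List String)) : Decidable (Pre_reorder_dict_by_eplet_frequency eplet_dict) := by unfold Pre_reorder_dict_by_eplet_frequency; infer_instance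
def pvWitness_reorder_dict_by_eplet_frequency : (List (String × List String)) :=
  [("b1", ["x", "y", "x"]), ("b2", ["y", "x"]), ("b3", ["z"])]

def Spec_reorder_dict_by_eplet_frequency (eplet_dict : List (String × List String)) (out : List (String × List String)) : Prop := out = reorder_dict_by_eplet_frequency_alt eplet_dict
instance (eplet_dict : List (String × List String)) (out : List (String × List String)) : Decidable (Spec_reorder_dict_by_eplet_frequency eplet_dict out) := by unfold Spec_reorder_dict_by_eplet_frequency; infer_instance

-- ===== CLAIM (what is proved, stated in full; the proofs are below) =====
def Claim_equal_reorder_dict_by_eplet_frequency : Prop := ∀ (eplet_dict : List (String × List String)), Dom_reorder_dict_by_eplet_frequency eplet_dict → Pre_reorder_dict_by_eplet_frequency eplet_dict → Spec_reorder_dict_by_eplet_frequency eplet_dict (reorder_dict_by_eplet_frequency eplet_dict)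

-- ===== LEMMAS AND PROOFS =====

-- inserting one element by a pivot test keeps a pairwise invariant
theorem pv_insertBy_pairwise {α : Type} (bef : α → α → Bool) (R : α → α → Prop)
    (htrans : ∀ a b c, R a b → R b c → R a c) (x : α) :
    ∀ acc : List α, acc.Pairwise R →
    (∀ y ∈ acc, (bef x y = true → R x y) ∧ (bef x y = false → R y x)) →
    (PySem.List.insertBy bef x acc).Pairwise R := by
  intro acc
  induction acc with
  | nil => intro _ _; simp [PySem.List.insertBy]
  | cons y ys ih =>
    intro h hc
    rw [List.pairwise_cons] at h
    simp only [PySem.List.insertBy]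
    by_cases hb : bef x y = true
    · rw [if_pos hb]
      refine List.pairwise_cons.mpr ⟨?_, List.pairwise_cons.mpr ⟨h.1, h.2⟩⟩
      intro z hz
      rcases List.mem_cons.mp hz with rfl | hz
      · exact (hc z (by simp)).1 hb
      · exact htrans _ _ _ ((hc y (by simp)).1 hb) (h.1 z hz)
    · rw [if_neg hb]
      refine List.pairwise_cons.mpr ⟨?_, ih h.2 (fun z hz => hc z (List.mem_cons_of_mem _ hz))⟩
      intro z hz
      rcases (PySem.List.mem_insertBy bef x z ys).mp hz with rfl | hz
      · exact (hc y (by simp)).2 (by simpa using hb)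
      · exact h.1 z hz

-- a whole insertion-sort fold keeps it, provided the scan order satisfies Q
theorem pv_foldl_insertBy_pairwise {α : Type} (bef : α → α → Bool) (Q R : α → α → Prop)
    (htrans : ∀ a b c, R a b → R b c → R a c)
    (hcond : ∀ x y, Q y x → (bef x y = true → R x y) ∧ (bef x y = false → R y x)) :
    ∀ (xs acc : List α), xs.Pairwise Q → acc.Pairwise R →
    (∀ a ∈ acc, ∀ b ∈ xs, Q a b) →
    (xs.foldl (fun acc x => PySem.List.insertBy bef x acc) acc).Pairwise R := by
  intro xs
  induction xs with
  | nil => intro acc _ hR _; simpa using hR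
  | cons x t ih =>
    intro acc hQ hR hacc
    rw [List.pairwise_cons] at hQ
    rw [List.foldl_cons]
    refine ih _ hQ.2 ?_ ?_
    · exact pv_insertBy_pairwise bef R htrans x acc hR
        (fun y hy => hcond x y (hacc y hy x (by simp)))
    · intro a ha b hb
      rcases (PySem.List.mem_insertBy bef x a acc).mp ha with rfl | ha
      · exact hQ.1 b hb
      · exact hacc a ha b (List.mem_cons_of_mem _ hb)

-- nodup lists index their own elements
theorem pv_idxOf_getElem (S : List String) (h : S.Nodup) (i : Nat) (hi : i < S.length) :
    S.idxOf S[i] = i := by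
  have hm : S[i] ∈ S := List.getElem_mem hi
  have h1 : S[S.idxOf S[i]]'(List.idxOf_lt_length_of_mem hm) = S[i] := List.getElem_idxOf _
  exact (List.Nodup.getElem_inj_iff h).mp h1

-- the two counting loops build the same counter
theorem pv_freq_A (ed : List (String × List String)) :
    (ed.foldl (fun fc p =>
      p.2.foldl (fun fc eplet =>
        if fc.contains eplet = false then fc.insert eplet 1
        else fc.modify eplet 0 (· + 1)) fc) PySem.Dict.empty)
      = PySem.Dict.counter (ed.flatMap Prod.snd) := by
  have h1 : (fun (fc : PySem.Dict String Int) (e : String) =>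
      if fc.contains e = false then fc.insert e 1 else fc.modify e 0 (· + 1))
      = fun fc e => fc.insert e (fc.getD e 0 + 1) := by
    funext fc e
    by_cases h : fc.contains e = false
    · simp [h, PySem.Dict.getD_of_not_contains fc 0 h]
    · simp [h, PySem.Dict.modify]
  rw [h1, ← PySem.Dict.foldl_insert_getD_add_one_eq_counter, List.foldl_flatMap]

theorem pv_freq_B (ed : List (String × List String)) :
    (ed.foldl (fun d p =>
      p.2.foldl (fun d e => d.insert e (d.getD e 0 + 1)) d) PySem.Dict.empty)
      = PySem.Dict.counter (ed.flatMap Prod.snd) := by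
  rw [← PySem.Dict.foldl_insert_getD_add_one_eq_counter, List.foldl_flatMap]

theorem main_spec : ∀ (ed : List (String × List String)), (ed.map Prod.fst).Nodup →
    reorder_dict_by_eplet_frequency ed = reorder_dict_by_eplet_frequency_alt ed := by
  intro ed hnd
  unfold reorder_dict_by_eplet_frequency reorder_dict_by_eplet_frequency_alt
  rw [pv_freq_A, pv_freq_B]
  set all := ed.flatMap Prod.snd with hall
  set cnt := PySem.Dict.counter all with hcnt
  set S : List String := PySem.Set.ofList all with hS
  have hSnd : S.Nodup := PySem.Set.nodup_ofList all
  have hkeys : cnt.keys = S := PySem.Dict.keys_counter all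
  -- the rank dict maps each eplet of S to its index in S
  have hnodupS1 : (((PySem.List.enumerate S 0).map (fun p => (p.2, p.1))).map Prod.fst).Nodup := by
    rw [List.map_map]
    have h2 : (Prod.fst ∘ fun p : Int × String => (p.2, p.1)) = fun p : Int × String => p.2 := rfl
    rw [h2, PySem.List.map_snd_enumerate]
    exact hSnd
  have hrank_items : (PySem.Dict.ofList ((PySem.List.enumerate cnt.keys).map (fun p => (p.2, p.1)))).items
      = (PySem.List.enumerate S 0).map (fun p => (p.2, p.1)) := by
    rw [hkeys, PySem.Dict.ofList, PySem.Dict.update]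
    have := PySem.Dict.items_foldl_insert_fresh ((PySem.List.enumerate S 0).map (fun p => (p.2, p.1)))
      Prod.fst Prod.snd PySem.Dict.empty (fun a _ => PySem.Dict.contains_empty a.1) hnodupS1
    simpa [PySem.Dict.empty] using this
  have hrget : ∀ e ∈ S, (PySem.Dict.ofList ((PySem.List.enumerate cnt.keys).map (fun p => (p.2, p.1)))).getD e 0
      = ((S.idxOf e : Nat) : Int) := by
    intro e he
    have hki : ((S.idxOf e : Int), e) ∈ PySem.List.enumerate S 0 := by
      rw [PySem.List.mem_enumerate_iff]
      exact ⟨S.idxOf e, List.idxOf_lt_length_of_mem he, by simp [List.getElem_idxOf]⟩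
    have hmem : (e, ((S.idxOf e : Nat) : Int)) ∈ (PySem.Dict.ofList ((PySem.List.enumerate cnt.keys).map (fun p => (p.2, p.1)))).items := by
      rw [hrank_items]
      exact List.mem_map.mpr ⟨((S.idxOf e : Int), e), hki, rfl⟩
    have hknd : (PySem.Dict.ofList ((PySem.List.enumerate cnt.keys).map (fun p => (p.2, p.1)))).keys.Nodup := by
      have hkdef : (PySem.Dict.ofList ((PySem.List.enumerate cnt.keys).map (fun p => (p.2, p.1)))).keys
          = (PySem.Dict.ofList ((PySem.List.enumerate cnt.keys).map (fun p => (p.2, p.1)))).items.map Prod.fst := rfl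
      rw [hkdef, hrank_items]
      exact hnodupS1
    exact PySem.Dict.getD_of_mem_items _ hmem hknd 0
  have hcget : ∀ e, cnt.getD e 0 = ((all.count e : Nat) : Int) := fun e => PySem.Dict.getD_counter all e
  -- the string order both sides realise: frequency descending, then first global appearance
  set Rs : String → String → Prop :=
    fun e1 e2 => (all.count e2 : Int) < (all.count e1 : Int) ∨
      ((all.count e1 : Int) = (all.count e2 : Int) ∧ S.idxOf e1 < S.idxOf e2) with hRs
  have hRstrans : ∀ a b c, Rs a b → Rs b c → Rs a c := by
    intro a b c h1 h2
    rcases h1 with h1 | ⟨h1, h1'⟩ <;> rcases h2 with h2 | ⟨h2, h2'⟩ <;>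
      first
        | exact Or.inl (by omega)
        | exact Or.inr ⟨by omega, by omega⟩
  have hRsanti : ∀ a b, Rs a b → Rs b a → False := by
    intro a b h1 h2
    rcases h1 with h1 | ⟨h1, h1'⟩ <;> rcases h2 with h2 | ⟨h2, h2'⟩ <;> omega
  -- A's sorted item list is pairwise Rs on its keys
  have hitems : cnt.items = S.map (fun k => (k, (all.count k : Int))) := PySem.Dict.items_counter all
  have hQitems : cnt.items.Pairwise (fun a b => S.idxOf a.1 < S.idxOf b.1) := by
    rw [hitems, List.pairwise_map]
    rw [List.pairwise_iff_getElem]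
    intro i j hi hj hij
    rw [pv_idxOf_getElem S hSnd i hi, pv_idxOf_getElem S hSnd j hj]
    exact hij
  have hQitems2 : cnt.items.Pairwise (fun a b => (S.idxOf a.1 < S.idxOf b.1 ∧
      a.2 = (all.count a.1 : Int) ∧ b.2 = (all.count b.1 : Int))) := by
    rw [hitems, List.pairwise_map]
    rw [List.pairwise_iff_getElem]
    intro i j hi hj hij
    refine ⟨?_, rfl, rfl⟩
    rw [pv_idxOf_getElem S hSnd i hi, pv_idxOf_getElem S hSnd j hj]
    exact hij
  have hpairA : (PySem.List.sorted cnt.items (fun item => item.2) true).Pairwise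
      (fun a b => Rs a.1 b.1) := by
    rw [PySem.List.sorted_rev_eq_foldl_insertBy]
    refine pv_foldl_insertBy_pairwise (fun a b => decide (b.2 < a.2))
      (fun a b => (S.idxOf a.1 < S.idxOf b.1 ∧
        a.2 = (all.count a.1 : Int) ∧ b.2 = (all.count b.1 : Int)))
      (fun a b => Rs a.1 b.1)
      (fun a b c h1 h2 => hRstrans a.1 b.1 c.1 h1 h2) ?_ cnt.items [] hQitems2 (by simp) (by simp)
    intro x y hq
    obtain ⟨hidx, hyc, hxc⟩ := hq
    constructor <;> intro hb <;> simp only [decide_eq_true_eq, decide_eq_false_iff_not] at hb <;>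
      simp only [hRs, hyc, hxc] at * <;> omega
  -- keys of the sorted item list are nodup, so A's re-built dict is the sorted list itself
  have hknd2 : ((PySem.List.sorted cnt.items (fun item => item.2) true).map Prod.fst).Nodup := by
    have hperm : ((PySem.List.sorted cnt.items (fun item => item.2) true).map Prod.fst).Perm
        (cnt.items.map Prod.fst) :=
      (PySem.List.sorted_perm cnt.items (fun item => item.2) true).map Prod.fst
    refine hperm.symm.nodup ?_
    rw [hitems, List.map_map]
    have hcomp : (Prod.fst ∘ fun k : String => (k, (all.count k : Int))) = id := rfl
    rw [hcomp, List.map_id]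
    exact hSnd
  have hfc2 : (PySem.Dict.ofList (PySem.List.sorted cnt.items (fun item => item.2) true)).items
      = PySem.List.sorted cnt.items (fun item => item.2) true := by
    rw [PySem.Dict.ofList, PySem.Dict.update]
    have := PySem.Dict.items_foldl_insert_fresh (PySem.List.sorted cnt.items (fun item => item.2) true)
      Prod.fst Prod.snd PySem.Dict.empty (fun a _ => PySem.Dict.contains_empty a.1) hknd2
    simpa [PySem.Dict.empty] using this
  -- the per-bead lists agree
  have hbead : ∀ p ∈ ed,
      ((PySem.Dict.ofList (PySem.List.sorted cnt.items (fun item => item.2) true)).items.foldl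
        (fun acc ij => if p.2.contains ij.1 then acc ++ [ij.1] else acc) [])
      = PySem.List.sorted2 (PySem.List.dedup p.2)
          (fun e => -(cnt.getD e 0))
          (fun e => (PySem.Dict.ofList ((PySem.List.enumerate cnt.keys).map (fun q => (q.2, q.1)))).getD e 0)
          false := by
    intro p hp
    have hsub : ∀ e ∈ p.2, e ∈ S := by
      intro e he
      rw [hS]
      exact (PySem.Set.mem_ofList _ _).mpr (List.mem_flatMap.mpr ⟨p, hp, he⟩)
    rw [hfc2, PySem.List.foldl_append_if (fun ij => p.2.contains ij.1) Prod.fst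
      (PySem.List.sorted cnt.items (fun item => item.2) true) [], List.nil_append]
    -- LHS is pairwise Rs
    have hLpair : (((PySem.List.sorted cnt.items (fun item => item.2) true).filter
        (fun ij => p.2.contains ij.1)).map Prod.fst).Pairwise Rs :=
      List.pairwise_map.mpr (hpairA.filter _)
    -- RHS is the same insertion fold; pairwise Rs as well
    have hord : PySem.List.sorted2 (PySem.List.dedup p.2)
          (fun e => -(cnt.getD e 0))
          (fun e => (PySem.Dict.ofList ((PySem.List.enumerate cnt.keys).map (fun q => (q.2, q.1)))).getD e 0)
          false
        = (PySem.List.dedup p.2).foldl (fun acc x => PySem.List.insertBy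
            (fun a b => decide (-(cnt.getD a 0) < -(cnt.getD b 0)) ||
              (!decide (-(cnt.getD b 0) < -(cnt.getD a 0)) &&
                decide ((PySem.Dict.ofList ((PySem.List.enumerate cnt.keys).map (fun q => (q.2, q.1)))).getD a 0
                  < (PySem.Dict.ofList ((PySem.List.enumerate cnt.keys).map (fun q => (q.2, q.1)))).getD b 0)))
            x acc) [] := by
      simp [PySem.List.sorted2]
    have hdQ : (PySem.List.dedup p.2).Pairwise (fun a b => a ∈ S ∧ b ∈ S ∧ a ≠ b) := by
      refine List.Pairwise.imp_of_mem ?_ (PySem.List.nodup_dedup p.2)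
      intro a b ha hb hne
      exact ⟨hsub a ((PySem.List.mem_dedup _ _).mp ha), hsub b ((PySem.List.mem_dedup _ _).mp hb), hne⟩
    have hRpairB : (PySem.List.sorted2 (PySem.List.dedup p.2)
          (fun e => -(cnt.getD e 0))
          (fun e => (PySem.Dict.ofList ((PySem.List.enumerate cnt.keys).map (fun q => (q.2, q.1)))).getD e 0)
          false).Pairwise Rs := by
      rw [hord]
      refine pv_foldl_insertBy_pairwise _ (fun a b => a ∈ S ∧ b ∈ S ∧ a ≠ b) Rs
        (fun a b c h1 h2 => hRstrans _ _ _ h1 h2) ?_ (PySem.List.dedup p.2) [] hdQ (by simp) (by simp)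
      intro x y hq
      obtain ⟨hyS, hxS, hyx⟩ := hq
      have hne : S.idxOf y ≠ S.idxOf x := fun h => hyx ((List.idxOf_inj hyS).mp h)
      have hrx := hrget x hxS
      have hry := hrget y hyS
      constructor
      · intro hb
        simp only [hrx, hry, hcget, Bool.or_eq_true, Bool.and_eq_true, Bool.not_eq_eq_eq_not,
          Bool.not_true, decide_eq_true_eq, decide_eq_false_iff_not] at hb
        simp only [hRs]
        omega
      · intro hb
        simp only [hrx, hry, hcget, Bool.or_eq_false_iff, Bool.and_eq_false_iff,
          Bool.not_eq_eq_eq_not, Bool.not_false, decide_eq_true_eq,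
          decide_eq_false_iff_not] at hb
        simp only [hRs]
        omega
    -- both sides list exactly the distinct eplets of the bead
    have hp1 : (((PySem.List.sorted cnt.items (fun item => item.2) true).filter
        (fun ij => p.2.contains ij.1)).map Prod.fst).Perm (S.filter (fun e => p.2.contains e)) := by
      have h1 : ((PySem.List.sorted cnt.items (fun item => item.2) true).filter
          (fun ij => p.2.contains ij.1)).Perm (cnt.items.filter (fun ij => p.2.contains ij.1)) :=
        (PySem.List.sorted_perm cnt.items (fun item => item.2) true).filter _
      have h2 : cnt.items.filter (fun ij => p.2.contains ij.1)
          = (S.filter (fun e => p.2.contains e)).map (fun k => (k, (all.count k : Int))) := by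
        rw [hitems, List.filter_map]
        rfl
      have h3 := h1.map Prod.fst
      rw [h2, List.map_map] at h3
      have hcomp : (Prod.fst ∘ fun k : String => (k, (all.count k : Int))) = id := rfl
      rw [hcomp, List.map_id] at h3
      exact h3
    have hp2 : (S.filter (fun e => p.2.contains e)).Perm (PySem.List.dedup p.2) := by
      rw [List.perm_ext_iff_of_nodup (hSnd.filter _) (PySem.List.nodup_dedup p.2)]
      intro a
      simp only [List.mem_filter, PySem.List.mem_dedup _ _]
      constructor
      · rintro ⟨-, hc⟩
        exact List.mem_of_elem_eq_true hc
      · intro ha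
        exact ⟨hsub a ha, List.elem_eq_true_of_mem ha⟩
    have hperm : (((PySem.List.sorted cnt.items (fun item => item.2) true).filter
        (fun ij => p.2.contains ij.1)).map Prod.fst).Perm
        (PySem.List.sorted2 (PySem.List.dedup p.2)
          (fun e => -(cnt.getD e 0))
          (fun e => (PySem.Dict.ofList ((PySem.List.enumerate cnt.keys).map (fun q => (q.2, q.1)))).getD e 0)
          false) :=
      hp1.trans (hp2.trans (PySem.List.sorted2_perm _ _ _ _).symm)
    exact List.Perm.eq_of_pairwise
      (fun a b _ _ h1 h2 => ((hRsanti a b h1 h2).elim)) hLpair hRpairB hperm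
  -- assemble: both result dicts are built by one fresh insert per bead
  have hAfinal := PySem.Dict.items_foldl_insert_fresh ed Prod.fst
    (fun p => (PySem.Dict.ofList (PySem.List.sorted cnt.items (fun item => item.2) true)).items.foldl
      (fun acc ij => if p.2.contains ij.1 then acc ++ [ij.1] else acc) [])
    PySem.Dict.empty (fun a _ => PySem.Dict.contains_empty a.1) hnd
  have hBfinal := PySem.Dict.items_foldl_insert_fresh ed Prod.fst
    (fun p => PySem.List.sorted2 (PySem.List.dedup p.2)
      (fun e => -(cnt.getD e 0))
      (fun e => (PySem.Dict.ofList ((PySem.List.enumerate cnt.keys).map (fun q => (q.2, q.1)))).getD e 0)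
      false)
    PySem.Dict.empty (fun a _ => PySem.Dict.contains_empty a.1) hnd
  rw [hAfinal, hBfinal]
  simp only [PySem.Dict.empty, List.nil_append]
  exact List.map_congr_left (fun p hp => by rw [hbead p hp])

-- ===== VERDICT (by name: the statement is the Claim_ definition above) =====
theorem reorder_dict_by_eplet_frequency_spec : Claim_equal_reorder_dict_by_eplet_frequency := by
  intro ed _ hpre
  unfold Spec_reorder_dict_by_eplet_frequency
  exact main_spec ed hpre
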